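-- pv_equiv track=rewrite | github.com/RJdeck/slots-extractor | bands/414/reconstruct.py | self_reconstruct
-- ===== SOURCE A (Python) =====
-- def self_reconstruct(frequency_dict):
--     icon_list = [item for sublist in frequency_dict.keys() for item in sublist]
--     freq_list = [item for sublist in frequency_dict.values()
--                  for item in sublist]
--
--     for index, freq in enumerate(freq_list[:-4]):
--         if freq == 0:
--             target_icon_list = icon_list[index:index+5]
--             for self_matching_index in range(0, len(freq_list)-4):
--                 if target_icon_list == icon_list[self_matching_index:self_matching_index+5] and index != self_matching_index:
--                     freq_list[index] = freq_list[self_matching_index] // 2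
--                     freq_list[self_matching_index] = freq_list[index]
--                     break
--     res_dict = {}
--     res_dict[tuple(icon_list)] = freq_list
--
--     return res_dict
-- ===== SOURCE B (Python) =====
-- def self_reconstruct(frequency_dict):
--     icons = [item for sublist in frequency_dict.keys() for item in sublist]
--     freqs = [item for sublist in frequency_dict.values() for item in sublist]
--     n = len(freqs)
--     # index every 5-icon window once: window -> list of its start indices (in order)
--     windows = {}
--     for j in range(n - 4):
--         windows.setdefault(tuple(icons[j:j + 5]), []).append(j)
--     zero_indices = [i for i, f in enumerate(freqs[:-4]) if f == 0]
--     for i in zero_indices: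
--         cands = windows.get(tuple(icons[i:i + 5]), [])
--         j = next((c for c in cands if c != i), None)
--         if j is not None:
--             half = freqs[j] // 2
--             freqs[i] = half
--             freqs[j] = half
--     return {tuple(icons): freqs}
-- ===== Notes on version B (the rewrite author's own statement) =====
-- stated objective: faster
-- what changed: B indexes all 5-icon windows once in a dict mapping window -> list of start indices and resolves each zero frequency by one lookup (first other index with the same window), replacing A's inner linear rescan per zero.
import Mathlib
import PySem

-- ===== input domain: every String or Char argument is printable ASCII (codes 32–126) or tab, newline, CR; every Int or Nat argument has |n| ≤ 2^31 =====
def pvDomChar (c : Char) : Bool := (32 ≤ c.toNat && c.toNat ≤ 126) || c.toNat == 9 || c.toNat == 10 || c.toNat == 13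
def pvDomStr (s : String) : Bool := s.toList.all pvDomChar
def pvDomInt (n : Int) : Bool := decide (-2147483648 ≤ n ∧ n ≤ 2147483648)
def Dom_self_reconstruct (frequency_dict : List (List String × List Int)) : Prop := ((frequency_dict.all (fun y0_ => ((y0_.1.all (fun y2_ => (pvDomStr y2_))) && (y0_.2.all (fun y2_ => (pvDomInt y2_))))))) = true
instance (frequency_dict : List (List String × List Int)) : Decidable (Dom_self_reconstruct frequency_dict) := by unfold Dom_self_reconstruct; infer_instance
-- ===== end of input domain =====

-- B replaces A's inner linear rescan per zero frequency by one dict of 5-icon windows built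
-- once (window -> indices), for an asymptotically faster lookup of the first other matching index.

-- icon_list[i:i+5] for a Nat index i (exact: i ≥ 0, Python slices clip at the end)
def pvWindow (icons : List String) (i : Nat) : List String := (icons.drop i).take 5

-- ===== PORT A =====
-- inner 'for self_matching_index in range(0, len(freq_list)-4): … break' loop of A
def pvInnerA (icons : List String) (index : Nat) (target : List String) :
    List Nat → List Int → List Int
  | [], fl => fl
  | sm :: rest, fl =>
    if target = pvWindow icons sm ∧ index ≠ sm then
      -- freq_list[index] = freq_list[sm] // 2 ; freq_list[sm] = freq_list[index]
      let fl1 := fl.set index (PySem.Int.floordiv (fl.getD sm 0) 2)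
      fl1.set sm (fl1.getD index 0)
    else pvInnerA icons index target rest fl

def self_reconstruct (frequency_dict : List (List String × List Int)) : List (List String × List Int) :=
  let icon_list := frequency_dict.flatMap Prod.fst
  let freq_list := frequency_dict.flatMap Prod.snd
  -- enumerate(freq_list[:-4]) is a snapshot of the original list; indices are Nats (exact: all ≥ 0)
  let fl := ((freq_list.take (freq_list.length - 4)).zipIdx).foldl
    (fun fl p =>
      if p.1 = 0 then
        pvInnerA icon_list p.2 (pvWindow icon_list p.2)
          (List.range (freq_list.length - 4)) fl
      else fl) freq_list
  [(icon_list, fl)]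

-- ===== PORT B =====
-- windows.setdefault(tuple(icons[j:j+5]), []).append(j)  ≡  modify key [] (· ++ [j])
def pvBuildWindows (icons : List String) (n : Nat) : PySem.Dict (List String) (List Nat) :=
  (List.range (n - 4)).foldl
    (fun d j => d.modify (pvWindow icons j) [] (· ++ [j])) PySem.Dict.empty

def self_reconstruct_alt (frequency_dict : List (List String × List Int)) : List (List String × List Int) :=
  let icons := frequency_dict.flatMap Prod.fst
  let freqs := frequency_dict.flatMap Prod.snd
  let n := freqs.length
  let windows := pvBuildWindows icons n
  let zero_indices := ((freqs.take (n - 4)).zipIdx.filter (fun p => p.1 = 0)).map Prod.snd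
  let fl := zero_indices.foldl
    (fun fl i =>
      match (windows.getD (pvWindow icons i) []).find? (fun c => c ≠ i) with
      | some j =>
        let half := PySem.Int.floordiv (fl.getD j 0) 2
        (fl.set i half).set j half
      | none => fl) freqs
  [(icons, fl)]

-- ===== PRECONDITION & SPEC =====
def Spec_self_reconstruct (frequency_dict : List (List String × List Int)) (out : List (List String × List Int)) : Prop := out = self_reconstruct_alt frequency_dict
instance (frequency_dict : List (List String × List Int)) (out : List (List String × List Int)) : Decidable (Spec_self_reconstruct frequency_dict out) := by unfold Spec_self_reconstruct; infer_instance

-- ===== CLAIM (what is proved, stated in full; the proofs are below) =====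
def Claim_equal_self_reconstruct : Prop := ∀ (frequency_dict : List (List String × List Int)), Dom_self_reconstruct frequency_dict → Spec_self_reconstruct frequency_dict (self_reconstruct frequency_dict)

-- ===== LEMMAS AND PROOFS =====

-- the windows dict looks up exactly the in-order list of matching window starts
theorem getD_buildWindows (icons : List String) (n : Nat) (k : List String) :
    (pvBuildWindows icons n).getD k []
      = (List.range (n - 4)).filter (fun j => pvWindow icons j == k) := by
  have h := PySem.Dict.getD_foldl_modify_append
    (l := (List.range (n - 4)).map (fun j => (pvWindow icons j, j)))
    (d := (PySem.Dict.empty : PySem.Dict (List String) (List Nat))) (c := k)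
  rw [List.foldl_map, List.filter_map, List.map_map] at h
  simpa [pvBuildWindows, Function.comp_def] using h

-- A's inner scan is a find? over the range
theorem pvInnerA_eq_find (icons : List String) (index : Nat) (target : List String)
    (l : List Nat) (fl : List Int) :
    pvInnerA icons index target l fl
      = match l.find? (fun sm => decide (target = pvWindow icons sm ∧ index ≠ sm)) with
        | some sm =>
          let fl1 := fl.set index (PySem.Int.floordiv (fl.getD sm 0) 2)
          fl1.set sm (fl1.getD index 0)
        | none => fl := by
  induction l with
  | nil => simp [pvInnerA, List.find?]
  | cons sm rest ih =>
    by_cases h : target = pvWindow icons sm ∧ index ≠ sm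
    · simp [pvInnerA, List.find?, h]
    · simp only [pvInnerA, if_neg h, List.find?]
      rw [decide_eq_false h]
      exact ih

-- finding the first sm with matching window and sm ≠ i = finding the first c ≠ i among matches
theorem find_filter_window (icons : List String) (i : Nat) (l : List Nat) :
    l.find? (fun sm => decide (pvWindow icons i = pvWindow icons sm ∧ i ≠ sm))
      = (l.filter (fun j => pvWindow icons j == pvWindow icons i)).find? (fun c => c ≠ i) := by
  induction l with
  | nil => rfl
  | cons sm rest ih =>
    by_cases hw : pvWindow icons sm = pvWindow icons i
    · rw [List.filter_cons_of_pos (by simpa using hw)]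
      by_cases hi : i = sm
      · rw [List.find?_cons_of_neg (by simp [hi]), List.find?_cons_of_neg (by simp [hi])]
        exact ih
      · rw [List.find?_cons_of_pos (by simp [hw.symm, hi]),
            List.find?_cons_of_pos (by simp; exact fun h => hi h.symm)]
    · rw [List.filter_cons_of_neg (by simpa using hw)]
      rw [List.find?_cons_of_neg (by simp; intro h; exact (hw h.symm).elim)]
      exact ih

-- a fold with an 'if p then step else skip' body = the fold of step over the filtered indices
theorem foldl_if_filter {α σ : Type} (l : List (Int × α)) (g : σ → Int × α → σ) (s : σ) :
    l.foldl (fun s p => if p.1 = 0 then g s p else s) s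
      = (l.filter (fun p => p.1 = 0)).foldl g s := by
  induction l generalizing s with
  | nil => rfl
  | cons x rest ih =>
    by_cases h : x.1 = 0
    · simp [List.filter, h, ih]
    · simp [List.filter, h, ih]

theorem self_reconstruct_eq_alt (fd : List (List String × List Int)) :
    self_reconstruct fd = self_reconstruct_alt fd := by
  unfold self_reconstruct self_reconstruct_alt
  simp only []
  set icons := fd.flatMap Prod.fst with hic
  set freqs := fd.flatMap Prod.snd with hfr
  set n := freqs.length with hn
  rw [foldl_if_filter, List.foldl_map]
  set zl := ((freqs.take (n - 4)).zipIdx.filter (fun p => p.1 = 0)) with hzl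
  -- every zero index is < n - 4
  have hmem : ∀ p ∈ zl, p.2 < n - 4 := by
    intro p hp
    have hp' := List.snd_lt_of_mem_zipIdx (List.mem_of_mem_filter hp)
    have hlen : (freqs.take (n - 4)).length ≤ n - 4 := by
      simp [List.length_take]
    omega
  -- the two folds agree on every state of length n
  suffices h : ∀ (zl : List (Int × Nat)), (∀ p ∈ zl, p.2 < n - 4) → ∀ (fl : List Int), fl.length = n →
      zl.foldl (fun fl p => pvInnerA icons p.2 (pvWindow icons p.2) (List.range (n - 4)) fl) fl
        = zl.foldl (fun fl p =>
            match ((pvBuildWindows icons n).getD (pvWindow icons p.2) []).find? (fun c => c ≠ p.2) with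
            | some j => (fl.set p.2 (PySem.Int.floordiv (fl.getD j 0) 2)).set j (PySem.Int.floordiv (fl.getD j 0) 2)
            | none => fl) fl by
    rw [h zl hmem freqs rfl]
  intro zl hzm
  induction zl with
  | nil => intro fl _; rfl
  | cons p rest ih =>
    intro fl hfl
    have hi : p.2 < n - 4 := hzm p (List.mem_cons_self)
    have hstep :
        pvInnerA icons p.2 (pvWindow icons p.2) (List.range (n - 4)) fl
          = match ((pvBuildWindows icons n).getD (pvWindow icons p.2) []).find? (fun c => c ≠ p.2) with
            | some j => (fl.set p.2 (PySem.Int.floordiv (fl.getD j 0) 2)).set j (PySem.Int.floordiv (fl.getD j 0) 2)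
            | none => fl := by
      rw [pvInnerA_eq_find, find_filter_window, getD_buildWindows]
      rcases hfind : ((List.range (n - 4)).filter (fun j => pvWindow icons j == pvWindow icons p.2)).find? (fun c => c ≠ p.2) with _ | j
      · rfl
      · have hlt : p.2 < fl.length := by omega
        have hkey : (fl.set p.2 (PySem.Int.floordiv (fl.getD j 0) 2)).getD p.2 0
            = PySem.Int.floordiv (fl.getD j 0) 2 := by
          simp [List.getD_eq_getElem?_getD, List.getElem?_set_self hlt]
        show (fl.set p.2 (PySem.Int.floordiv (fl.getD j 0) 2)).set j
              ((fl.set p.2 (PySem.Int.floordiv (fl.getD j 0) 2)).getD p.2 0) = _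
        rw [hkey]
    simp only [List.foldl_cons, hstep]
    have hlen2 : (match ((pvBuildWindows icons n).getD (pvWindow icons p.2) []).find? (fun c => c ≠ p.2) with
            | some j => (fl.set p.2 (PySem.Int.floordiv (fl.getD j 0) 2)).set j (PySem.Int.floordiv (fl.getD j 0) 2)
            | none => fl).length = n := by
      rcases ((pvBuildWindows icons n).getD (pvWindow icons p.2) []).find? (fun c => c ≠ p.2) with _ | j
      · exact hfl
      · simpa using hfl
    exact ih (fun x hx => hzm x (List.mem_cons_of_mem _ hx)) _ hlen2

-- ===== VERDICT (by name: the statement is the Claim_ definition above) =====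
theorem self_reconstruct_spec : Claim_equal_self_reconstruct := by
  intro fd _
  exact self_reconstruct_eq_alt fd
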